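-- pv_equiv track=rewrite | github.com/olgs0011/praktika2025 | top_100_02.py | get_top_and_related_articles
-- ===== SOURCE A (Python) =====
-- import heapq
-- from collections import defaultdict
--
-- def get_top_and_related_articles(citation_network, top_n=100):
--     """Возвращает топ-N статей и все связанные статьи"""
--     # Считаем общее количество цитирований
--     citation_counts = defaultdict(int)
--     for paper, cited in citation_network.items():
--         citation_counts[paper] += len(cited)
--         for cited_paper in cited:
--             citation_counts[cited_paper] += 1
--
--     # Выбираем топ-N статей
--     top_articles = heapq.nlargest(top_n, citation_counts.items(), key=lambda x: x[1])
--     top_ids = {paper_id for paper_id, _ in top_articles}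
--
--     # Находим все связанные статьи
--     related_articles = set()
--     for paper_id in top_ids:
--         related_articles.update(citation_network.get(paper_id, set()))
--         # Находим статьи, которые цитируют текущую топ-статью
--         for citing_paper, cited in citation_network.items():
--             if paper_id in cited:
--                 related_articles.add(citing_paper)
--
--     return top_ids.union(related_articles), citation_counts
-- ===== SOURCE B (Python) =====
-- def get_top_and_related_articles(citation_network, top_n=100):
--     """Топ-N статей и все связанные: плоский список событий + обратный индекс + одна дедупликация"""
--     # Phase 1: flatten the network into a stream of (id, weight) events, then fold once.
--     events = []
--     for paper, cited in citation_network.items():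
--         events.append((paper, len(cited)))
--         events.extend((c, 1) for c in cited)
--     citation_counts = {}
--     for k, v in events:
--         citation_counts[k] = citation_counts.get(k, 0) + v
--
--     # Reverse index built once: cited id -> citing papers (each once, network order).
--     citers = {}
--     for paper, cited in citation_network.items():
--         for c in set(cited):
--             citers.setdefault(c, []).append(paper)
--
--     ranked = sorted(citation_counts.items(), key=lambda x: x[1], reverse=True)
--     top_order = [p for p, _ in ranked[:max(top_n, 0)]]
--
--     # Phase 3: one candidate list (top ids, then neighbours via lookups), deduplicated once.
--     candidates = top_order + [x for t in top_order
--                               for x in citation_network.get(t, []) + citers.get(t, [])]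
--     return set(candidates), citation_counts
-- ===== Notes on version B (the rewrite author's own statement) =====
-- stated objective: faster
-- what changed: Counting becomes a flat event stream folded once instead of A's nested per-paper updates; phase 3's nested rescan of the whole network per top article is replaced by a reverse citers index built in one pass, and the result set is produced by a single deduplication of one candidate list instead of incremental set updates.
import Mathlib
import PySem

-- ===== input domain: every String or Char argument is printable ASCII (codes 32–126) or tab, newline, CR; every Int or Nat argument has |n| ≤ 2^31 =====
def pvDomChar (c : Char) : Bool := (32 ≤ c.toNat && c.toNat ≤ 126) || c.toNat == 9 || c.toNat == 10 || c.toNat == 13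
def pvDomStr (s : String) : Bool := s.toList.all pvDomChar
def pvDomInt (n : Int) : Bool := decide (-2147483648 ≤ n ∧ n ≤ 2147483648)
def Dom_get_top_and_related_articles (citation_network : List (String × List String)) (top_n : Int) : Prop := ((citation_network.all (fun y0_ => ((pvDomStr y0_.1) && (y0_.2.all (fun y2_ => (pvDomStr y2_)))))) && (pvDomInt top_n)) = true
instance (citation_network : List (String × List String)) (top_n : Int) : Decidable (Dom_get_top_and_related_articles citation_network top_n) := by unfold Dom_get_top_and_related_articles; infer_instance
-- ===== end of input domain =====

-- B counts via a flat event stream folded once, replaces A's per-top-article rescan of the whole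
-- network by a reverse citers index built in one pass, and builds the result set by one
-- deduplication of a single candidate list (objective: faster).
-- Set-valued results are modelled as lists of distinct elements; outputs are compared as sets.

-- ===== PORT A =====
def get_top_and_related_articles (citation_network : List (String × List String)) (top_n : Int) :
    List String × (List (String × Int)) :=
  -- citation_counts = defaultdict(int); counts[paper] += len(cited); counts[c] += 1
  let citation_counts : PySem.Dict String Int :=
    citation_network.foldl (fun d pc =>
      pc.2.foldl (fun d c => d.modify c 0 (· + 1)) (d.modify pc.1 0 (· + (pc.2.length : Int))))
      PySem.Dict.empty
  -- heapq.nlargest(top_n, items, key=λx: x[1]) — ported by its documented contract sorted(items, key, reverse=True)[:top_n]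
  let top_articles := (PySem.List.sorted citation_counts.items (fun x => x.2) true).take top_n.toNat
  let top_ids : PySem.Set String := PySem.Set.ofList (top_articles.map (fun x => x.1))
  let related_articles : PySem.Set String :=
    top_ids.foldl (fun r t =>
      let r := PySem.Set.update r ((PySem.Dict.mk citation_network).getD t [])
      citation_network.foldl (fun r pc => if pc.2.contains t then PySem.Set.add r pc.1 else r) r)
      PySem.Set.empty
  (PySem.Set.union top_ids related_articles, citation_counts.items)

-- ===== PORT B =====
def get_top_and_related_articles_alt (citation_network : List (String × List String)) (top_n : Int) :
    List String × (List (String × Int)) :=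
  -- events = [(paper, len(cited))] ++ [(c, 1) for c in cited], flattened over the whole network
  let events : List (String × Int) :=
    citation_network.flatMap (fun pc =>
      (pc.1, (pc.2.length : Int)) :: pc.2.map (fun c => (c, (1 : Int))))
  -- for k, v in events: counts[k] = counts.get(k, 0) + v
  let citation_counts : PySem.Dict String Int :=
    events.foldl (fun d kv => d.insert kv.1 (d.getD kv.1 0 + kv.2)) PySem.Dict.empty
  -- citers = {}; for paper, cited: for c in set(cited): citers.setdefault(c, []).append(paper)
  let citers : PySem.Dict String (List String) :=
    citation_network.foldl (fun d pc =>
      (PySem.Set.ofList pc.2).foldl (fun d c => d.modify c [] (· ++ [pc.1])) d)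
      PySem.Dict.empty
  -- ranked = sorted(counts.items(), key=λx: x[1], reverse=True); top_order = [p for p,_ in ranked[:max(top_n,0)]]
  let ranked := PySem.List.sorted citation_counts.items (fun x => x.2) true
  let top_order := (ranked.take (max top_n 0).toNat).map (fun x => x.1)
  -- candidates = top_order + [x for t in top_order for x in network.get(t, []) + citers.get(t, [])]
  let candidates :=
    top_order ++ top_order.flatMap (fun t =>
      (PySem.Dict.mk citation_network).getD t [] ++ citers.getD t [])
  (PySem.Set.ofList candidates, citation_counts.items)

-- ===== PRECONDITION & SPEC =====
def Spec_get_top_and_related_articles (citation_network : List (String × List String)) (top_n : Int) (out : List String × (List (String × Int))) : Prop := out = get_top_and_related_articles_alt citation_network top_n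
instance (citation_network : List (String × List String)) (top_n : Int) (out : List String × (List (String × Int))) : Decidable (Spec_get_top_and_related_articles citation_network top_n out) := by unfold Spec_get_top_and_related_articles; infer_instance

-- ===== CLAIM (what is proved, stated in full; the proofs are below) =====
def Claim_equal_get_top_and_related_articles : Prop := ∀ (citation_network : List (String × List String)) (top_n : Int), Dom_get_top_and_related_articles citation_network top_n → Spec_get_top_and_related_articles citation_network top_n (get_top_and_related_articles citation_network top_n)

-- ===== LEMMAS AND PROOFS =====

-- The two counting loops build the same dict: B's single fold over the flattened event
-- stream regroups into A's nested fold (and d[k] = d.get(k,0)+v is d.modify k 0 (+v)).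
lemma pv_counts_eq (net : List (String × List String)) :
    (net.flatMap (fun pc => (pc.1, (pc.2.length : Int)) :: pc.2.map (fun c => (c, (1 : Int))))).foldl
        (fun d kv => d.insert kv.1 (d.getD kv.1 0 + kv.2)) PySem.Dict.empty
      = net.foldl (fun d pc =>
          pc.2.foldl (fun d c => d.modify c 0 (· + 1)) (d.modify pc.1 0 (· + (pc.2.length : Int))))
          PySem.Dict.empty := by
  rw [List.foldl_flatMap]
  congr 1
  funext d pc
  rw [List.foldl_cons, List.foldl_map]
  rfl

-- On a duplicate-free list, filtering for one element leaves at most that element.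
lemma pv_filter_beq_of_nodup {l : List String} (h : l.Nodup) (t : String) :
    l.filter (fun c => c == t) = if t ∈ l then [t] else [] := by
  induction l with
  | nil => simp
  | cons a l ih =>
    rcases List.nodup_cons.mp h with ⟨ha, hl⟩
    by_cases hat : a = t
    · subst hat
      have : l.filter (fun c => c == a) = [] :=
        List.filter_eq_nil_iff.mpr (fun c hc h' => ha ((eq_of_beq h') ▸ hc))
      simp [this]
    · simp [hat, ih hl, Ne.symm hat]

-- The reverse index: citers.get(t, []) lists exactly the papers whose cited-list contains t, in network order.
lemma pv_citers_getD (net : List (String × List String)) (t : String) :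
    ∀ d : PySem.Dict String (List String),
      ((net.foldl (fun d pc =>
          (PySem.Set.ofList pc.2).foldl (fun d c => d.modify c [] (· ++ [pc.1])) d) d).getD t [])
        = d.getD t [] ++ (net.filter (fun pc => pc.2.contains t)).map Prod.fst := by
  induction net with
  | nil => simp
  | cons pc rest ih =>
    intro d
    have hin : ((PySem.Set.ofList pc.2).foldl (fun d c => d.modify c [] (· ++ [pc.1])) d).getD t []
        = d.getD t [] ++ (if pc.2.contains t then [pc.1] else []) := by
      rw [show ((PySem.Set.ofList pc.2).foldl (fun d c => d.modify c [] (· ++ [pc.1])) d)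
            = (((PySem.Set.ofList pc.2).map (fun c => (c, pc.1))).foldl
                (fun d q => d.modify q.1 [] (· ++ [q.2])) d) from by rw [List.foldl_map],
        PySem.Dict.getD_foldl_modify_append, List.filter_map]
      have : ((PySem.Set.ofList pc.2).filter ((fun q : String × String => q.1 == t) ∘ (fun c => (c, pc.1))))
          = if t ∈ pc.2 then [t] else [] := by
        rw [show ((fun q : String × String => q.1 == t) ∘ (fun c : String => (c, pc.1)))
              = (fun c : String => c == t) from rfl]
        rw [pv_filter_beq_of_nodup (PySem.Set.nodup_ofList pc.2) t]
        simp [PySem.Set.mem_ofList]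
      rw [this]
      by_cases hmem : t ∈ pc.2 <;> simp [hmem]
    simp only [List.foldl_cons, ih, hin, List.filter_cons]
    by_cases hmem : t ∈ pc.2 <;> simp [hmem, List.append_assoc]

-- A's inner scan over the network is one Set.update with the citers of t.
lemma pv_scan_eq_update (net : List (String × List String)) (t : String) (r : PySem.Set String) :
    net.foldl (fun r pc => if pc.2.contains t then PySem.Set.add r pc.1 else r) r
      = PySem.Set.update r ((net.filter (fun pc => pc.2.contains t)).map Prod.fst) := by
  rw [PySem.List.foldl_if_eq_foldl_filter, PySem.Set.update, ← List.foldl_map]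

-- A fold of Set.updates is one Set.update with the concatenation.
lemma pv_foldl_update (g : String → List String) :
    ∀ (ts : List String) (s : PySem.Set String),
      ts.foldl (fun r t => PySem.Set.update r (g t)) s = PySem.Set.update s (ts.flatMap g) := by
  intro ts
  induction ts with
  | nil => intro s; simp [PySem.Set.update]
  | cons t rest ih => intro s; simp only [List.foldl_cons, ih, List.flatMap_cons, PySem.Set.update_append]

-- Unioning a set built from scratch equals updating in place.
lemma pv_union_update (s : PySem.Set String) (L : List String) :
    PySem.Set.union s (PySem.Set.update PySem.Set.empty L) = PySem.Set.update s L := by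
  rw [show PySem.Set.update PySem.Set.empty L = PySem.Set.ofList L from rfl,
    show PySem.Set.union s (PySem.Set.ofList L) = PySem.Set.update s (PySem.Set.ofList L) from rfl,
    PySem.Set.update_eq_append_filter, PySem.Set.update_eq_append_filter, PySem.Set.ofList_ofList]

-- A's whole phase 3, for a duplicate-free list ts of top ids, is one update with the
-- concatenated neighbour lists — the list B deduplicates in one go.
lemma pv_phase3 (net : List (String × List String)) (ts : List String) (hnd : ts.Nodup)
    (g : String → List String)
    (hg : ∀ t, g t = (PySem.Dict.mk net).getD t []
        ++ (net.filter (fun pc => pc.2.contains t)).map Prod.fst) :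
    PySem.Set.union (PySem.Set.ofList ts)
      ((PySem.Set.ofList ts).foldl (fun r t =>
        net.foldl (fun r pc => if pc.2.contains t then PySem.Set.add r pc.1 else r)
          (PySem.Set.update r ((PySem.Dict.mk net).getD t []))) PySem.Set.empty)
    = PySem.Set.ofList (ts ++ ts.flatMap g) := by
  have hset : PySem.Set.ofList ts = ts := PySem.Set.ofList_eq_self_of_nodup ts hnd
  have hbody : (fun (r : PySem.Set String) (t : String) =>
      net.foldl (fun r pc => if pc.2.contains t then PySem.Set.add r pc.1 else r)
        (PySem.Set.update r ((PySem.Dict.mk net).getD t [])))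
      = fun r t => PySem.Set.update r (g t) := by
    funext r t
    rw [pv_scan_eq_update, ← PySem.Set.update_append, ← hg]
  rw [hbody, hset, pv_foldl_update, pv_union_update, PySem.Set.ofList_append, hset]

-- The top-id list comes from the keys of the counts dict via a permutation and a take,
-- hence carries no duplicates.
lemma pv_top_nodup (counts : PySem.Dict String Int) (hk : counts.keys.Nodup) (n : Nat) :
    (((PySem.List.sorted counts.items (fun x => x.2) true).take n).map (fun x => x.1)).Nodup := by
  have hperm : ((PySem.List.sorted counts.items (fun x => x.2) true).map (fun x : String × Int => x.1)).Perm
      (counts.items.map (fun x : String × Int => x.1)) :=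
    (PySem.List.sorted_perm counts.items (fun x => x.2) true).map _
  have hnd : ((PySem.List.sorted counts.items (fun x => x.2) true).map (fun x : String × Int => x.1)).Nodup :=
    hperm.nodup_iff.mpr hk
  exact ((List.take_sublist n _).map _).nodup hnd

lemma pv_main (net : List (String × List String)) (tn : Int) :
    get_top_and_related_articles net tn = get_top_and_related_articles_alt net tn := by
  simp only [get_top_and_related_articles, get_top_and_related_articles_alt]
  rw [pv_counts_eq]
  have htn : (max tn 0).toNat = tn.toNat := by omega
  rw [htn]
  refine Prod.ext ?_ rfl
  have hk : (net.foldl (fun d pc =>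
      pc.2.foldl (fun d c => d.modify c 0 (· + 1)) (d.modify pc.1 0 (· + (pc.2.length : Int))))
      PySem.Dict.empty).keys.Nodup := by
    rw [← pv_counts_eq]
    exact PySem.Dict.nodup_keys_foldl_insert_key _ _ _ _ PySem.Dict.nodup_keys_empty
  exact pv_phase3 net _ (pv_top_nodup _ hk _) _
    (fun t => by rw [pv_citers_getD net t PySem.Dict.empty, PySem.Dict.getD_empty, List.nil_append])

-- ===== VERDICT (by name: the statement is the Claim_ definition above) =====
theorem get_top_and_related_articles_spec : Claim_equal_get_top_and_related_articles := by
  intro net tn _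
  exact pv_main net tn
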